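-- pv_equiv track=rewrite | github.com/carpsesdema/AvA_Re | utils/code_output_processor.py | clean_and_format_code
-- ===== SOURCE A (Python) =====
-- def clean_and_format_code(code: str) -> str:
--     """Removes leading/trailing empty lines and extraneous whitespace from code block."""
--     if not code: return ""
--
--     lines = code.split('\n')
--
--     # Remove leading and trailing blank lines
--     start_index = 0
--     while start_index < len(lines) and not lines[start_index].strip():
--         start_index += 1
--
--     end_index = len(lines) - 1
--     while end_index >= 0 and not lines[end_index].strip():
--         end_index -= 1
--
--     if start_index > end_index: return ""  # All lines were blank
--
--     cleaned_lines = lines[start_index: end_index + 1]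
--
--     # Optionally, attempt to unindent common leading whitespace if it's excessive
--     # This is a simple heuristic and might not be perfect for all cases.
--     if cleaned_lines:
--         # Find minimum leading whitespace in non-empty lines
--         min_indent = float('inf')
--         for line in cleaned_lines:
--             if line.strip():  # Only consider non-empty lines
--                 leading_space = len(line) - len(line.lstrip(' '))
--                 leading_tabs_as_space = (len(line) - len(line.lstrip('\t'))) * 4  # Assuming tab = 4 spaces
--                 current_line_indent = min(leading_space, leading_tabs_as_space)  # Use the smaller if mixed
--                 min_indent = min(min_indent, current_line_indent)
--
--         if min_indent != float('inf') and min_indent > 0: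
--             # Unindent lines by the minimum common indent
--             # This is tricky because it assumes consistent indentation was intended.
--             # A more robust solution would use an AST formatter like Black if possible,
--             # but that's a heavier dependency.
--             # For now, a simpler unindent if all lines share a common prefix.
--
--             # Check if all non-empty lines share this common prefix
--             # We need to be careful if tabs and spaces are mixed.
--             # This simple common prefix check might not be robust enough.
--             # Let's refine to check if *all* lines can be unindented by this amount.
--
--             can_unindent_all = True
--             temp_unindented_lines = []
--
--             for line_idx, line in enumerate(cleaned_lines):
--                 if line.strip():  # Only operate on non-empty lines for unindenting
--                     # Try to remove the min_indent amount of spaces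
--                     if line.startswith(" " * min_indent):
--                         temp_unindented_lines.append(line[min_indent:])
--                     # Else, if tabs were the source of min_indent, this logic is too simple.
--                     # For now, if it doesn't start with that many spaces, we can't uniformly unindent.
--                     # A more sophisticated approach would convert all leading tabs to spaces first.
--                     else:  # Fallback: if a line doesn't have that prefix, don't unindent the block
--                         can_unindent_all = False
--                         break
--                 else:  # Keep empty lines as they are
--                     temp_unindented_lines.append(line)
--
--             if can_unindent_all:
--                 cleaned_lines = temp_unindented_lines
--
--     return '\n'.join(cleaned_lines)
-- ===== SOURCE B (Python) =====
-- def clean_and_format_code(code: str) -> str: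
--     """Removes leading/trailing empty lines from code block."""
--     if not code: return ""
--     lines = code.split('\n')
--     idx = [i for i, l in enumerate(lines) if l.strip()]
--     if not idx: return ""
--     return '\n'.join(lines[idx[0]: idx[-1] + 1])
-- ===== Notes on version B (the rewrite author's own statement) =====
-- stated objective: simpler
-- what changed: B computes the list of non-blank line indices in one enumerate pass and slices between its first and last element, replacing A's two index-scanning while-loops and omitting A's unindent block, which is dead code (its computed minimum indent is always 0 because no line can start with both a space and a tab).
import Mathlib
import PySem

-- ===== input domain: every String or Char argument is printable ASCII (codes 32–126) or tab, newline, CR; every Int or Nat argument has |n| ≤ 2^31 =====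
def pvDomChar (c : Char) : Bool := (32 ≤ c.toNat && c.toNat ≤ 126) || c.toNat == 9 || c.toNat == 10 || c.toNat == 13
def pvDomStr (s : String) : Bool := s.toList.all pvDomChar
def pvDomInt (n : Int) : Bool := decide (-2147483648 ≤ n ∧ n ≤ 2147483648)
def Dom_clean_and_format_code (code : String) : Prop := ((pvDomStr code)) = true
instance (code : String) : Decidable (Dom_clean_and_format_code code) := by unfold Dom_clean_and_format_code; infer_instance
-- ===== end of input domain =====

-- B trims leading/trailing blank lines by slicing between the first and last non-blank line index
-- (one comprehension pass) instead of A's two index-scanning while-loops; A's unindent block is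
-- provably dead (its computed minimum indent is always 0), so B omits it — objective: simpler.

-- 'not line.strip()' — the blank-line test both Pythons use
def pvBlank (l : String) : Bool := PySem.Str.strip l == ""

-- ===== PORT A =====
-- 'while start_index < len(lines) and not lines[start_index].strip(): start_index += 1'
def pvStartLoop (lines : List String) (s : Int) : Int :=
  if h : s < (lines.length : Int) ∧ pvBlank (PySem.List.pyGetD lines s "") then
    pvStartLoop lines (s + 1)
  else s
termination_by ((lines.length : Int) - s).toNat
decreasing_by omega

-- 'while end_index >= 0 and not lines[end_index].strip(): end_index -= 1'
def pvEndLoop (lines : List String) (e : Int) : Int :=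
  if h : 0 ≤ e ∧ pvBlank (PySem.List.pyGetD lines e "") then
    pvEndLoop lines (e - 1)
  else e
termination_by (e + 1).toNat
decreasing_by omega

-- min(len(line)-len(line.lstrip(' ')), (len(line)-len(line.lstrip('\t')))*4)
-- lstrip(' ') / lstrip('\t') are ported exactly as dropWhile on the single character
def pvLineIndent (l : String) : Nat :=
  let ls := l.toList.length - (l.toList.dropWhile (· == ' ')).length
  let lt := (l.toList.length - (l.toList.dropWhile (· == '\t')).length) * 4
  min ls lt

-- the min_indent accumulation loop (none plays float('inf'))
def pvMinIndent (cleaned : List String) : Option Nat :=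
  cleaned.foldl
    (fun mi l =>
      if pvBlank l then mi
      else
        match mi with
        | none => some (pvLineIndent l)
        | some m => some (min m (pvLineIndent l)))
    none

-- the 'can_unindent_all' for-loop with its break (none = break happened)
def pvUnindentLoop (m : Nat) : List String → Option (List String)
  | [] => some []
  | l :: ls =>
    if pvBlank l then (pvUnindentLoop m ls).map (fun t => l :: t)
    else if PySem.Str.startswith l (String.ofList (List.replicate m ' ')) then
      (pvUnindentLoop m ls).map (fun t => PySem.Str.slice l (some (m : Int)) none :: t)
    else none

def clean_and_format_code (code : String) : String :=
  if code == "" then ""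
  else
    let lines := (PySem.Str.split? code "\n").getD []
    let start := pvStartLoop lines 0
    let endIdx := pvEndLoop lines ((lines.length : Int) - 1)
    if start > endIdx then ""
    else
      let cleaned := PySem.List.slice lines (some start) (some (endIdx + 1))
      let cleaned2 :=
        if cleaned.isEmpty then cleaned
        else
          match pvMinIndent cleaned with
          | none => cleaned
          | some m =>
            if 0 < m then
              match pvUnindentLoop m cleaned with
              | some t => t
              | none => cleaned
            else cleaned
      PySem.Str.join "\n" cleaned2

-- ===== PORT B =====
def clean_and_format_code_alt (code : String) : String :=
  if code == "" then ""
  else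
    let lines := (PySem.Str.split? code "\n").getD []
    -- idx = [i for i, l in enumerate(lines) if l.strip()]
    let idx := ((PySem.List.enumerate lines).filter (fun p => !pvBlank p.2)).map Prod.fst
    match idx with
    | [] => ""
    | i0 :: rest =>
      PySem.Str.join "\n" (PySem.List.slice lines (some i0) (some ((i0 :: rest).getLastD 0 + 1)))

-- ===== PRECONDITION & SPEC =====
def Spec_clean_and_format_code (code : String) (out : String) : Prop := out = clean_and_format_code_alt code
instance (code : String) (out : String) : Decidable (Spec_clean_and_format_code code out) := by unfold Spec_clean_and_format_code; infer_instance

-- ===== CLAIM (what is proved, stated in full; the proofs are below) =====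
def Claim_equal_clean_and_format_code : Prop := ∀ (code : String), Dom_clean_and_format_code code → Spec_clean_and_format_code code (clean_and_format_code code)

-- ===== LEMMAS AND PROOFS =====

-- B's index list, named for the proofs
def pvNbIdx (lines : List String) (off : Int) : List Int :=
  ((PySem.List.enumerate lines off).filter (fun p => !pvBlank p.2)).map Prod.fst

lemma pvNbIdx_nil (off : Int) : pvNbIdx [] off = [] := rfl

lemma pvNbIdx_cons (l : String) (ls : List String) (off : Int) :
    pvNbIdx (l :: ls) off =
      (if pvBlank l then [] else [off]) ++ pvNbIdx ls (off + 1) := by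
  simp [pvNbIdx, PySem.List.enumerate_cons, List.filter_cons]
  by_cases h : pvBlank l <;> simp [h]

lemma pvNbIdx_concat (ys : List String) (l : String) (off : Int) :
    pvNbIdx (ys ++ [l]) off =
      pvNbIdx ys off ++ (if pvBlank l then [] else [off + ys.length]) := by
  simp [pvNbIdx, PySem.List.enumerate_append, List.filter_append, PySem.List.enumerate_cons]
  by_cases h : pvBlank l <;> simp [h]

lemma pvNbIdx_eq_nil_iff (lines : List String) (off : Int) :
    pvNbIdx lines off = [] ↔ lines.all pvBlank = true := by
  induction lines generalizing off with
  | nil => simp [pvNbIdx_nil]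
  | cons l ls ih =>
    rw [pvNbIdx_cons]
    by_cases h : pvBlank l <;> simp [h, ih]

lemma pvNbIdx_head (lines : List String) (off : Int)
    (h : lines.all pvBlank = false) :
    ∃ rest, pvNbIdx lines off =
      (off + ((lines.takeWhile pvBlank).length : Int)) :: rest := by
  induction lines generalizing off with
  | nil => simp at h
  | cons l ls ih =>
    rw [pvNbIdx_cons]
    by_cases hl : pvBlank l
    · have hls : ls.all pvBlank = false := by simpa [hl] using h
      obtain ⟨rest, hr⟩ := ih (off + 1) hls
      refine ⟨rest, ?_⟩
      simp [hl, hr, List.takeWhile_cons]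
      push_cast
      ring
    · refine ⟨pvNbIdx ls (off + 1), ?_⟩
      simp [hl, List.takeWhile_cons]

lemma pvNbIdx_last (lines : List String) (off : Int)
    (h : lines.all pvBlank = false) :
    (pvNbIdx lines off).getLastD 0 =
      off + (lines.length : Int) - 1 - ((lines.reverse.takeWhile pvBlank).length : Int) := by
  induction lines using List.reverseRecOn generalizing off with
  | nil => simp at h
  | append_singleton ys l ih =>
    rw [pvNbIdx_concat]
    by_cases hl : pvBlank l
    · have hys : ys.all pvBlank = false := by
        simp only [List.all_append, List.all_cons, List.all_nil] at h
        simpa [hl] using h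
      rw [if_pos hl, List.append_nil, ih off hys]
      simp [hl, List.takeWhile_cons]
      push_cast
      ring
    · simp [hl, List.getLastD_concat, List.takeWhile_cons]
      push_cast
      ring

lemma pvNbIdx_pairwise (lines : List String) (off : Int) :
    (pvNbIdx lines off).Pairwise (· < ·) := by
  have h := PySem.List.pairwise_lt_enumerate lines off
  have h2 := h.filter (fun p => !pvBlank p.2)
  exact h2.map Prod.fst (fun a b hab => hab)

lemma head_le_getLastD_of_pairwise_lt (i0 : Int) (rest : List Int)
    (h : (i0 :: rest).Pairwise (· < ·)) : i0 ≤ (i0 :: rest).getLastD 0 := by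
  induction rest generalizing i0 with
  | nil => simp
  | cons r rs ih =>
    have h1 : i0 < r := (List.pairwise_cons.mp h).1 r (by simp)
    have h2 := ih r (List.pairwise_cons.mp h).2
    simp only [List.getLastD_cons] at h2 ⊢
    omega

lemma pvStartLoop_eq (lines : List String) :
    ∀ n (s : Nat), lines.length - s = n →
      pvStartLoop lines (s : Int) = (s : Int) + (((lines.drop s).takeWhile pvBlank).length : Int) := by
  intro n
  induction n with
  | zero =>
    intro s hs
    have hle : lines.length ≤ s := by omega
    rw [pvStartLoop]
    rw [dif_neg (by simp; intro h; exact absurd h (by push_cast; omega))]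
    simp [List.drop_eq_nil_of_le hle]
  | succ n ih =>
    intro s hs
    have hlt : s < lines.length := by omega
    have hdrop : lines.drop s = lines[s] :: lines.drop (s + 1) :=
      List.drop_eq_getElem_cons hlt
    have hget : PySem.List.pyGetD lines (s : Int) "" = lines[s] := by
      rw [PySem.List.pyGetD_natCast, List.getD_eq_getElem _ _ hlt]
    rw [pvStartLoop]
    by_cases hb : pvBlank lines[s]
    · rw [dif_pos ⟨by push_cast; omega, by rw [hget]; exact hb⟩]
      have : ((s : Int) + 1) = ((s + 1 : Nat) : Int) := by push_cast; ring
      rw [this, ih (s + 1) (by omega)]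
      rw [hdrop, List.takeWhile_cons, if_pos hb]
      simp only [List.length_cons]
      push_cast
      omega
    · rw [dif_neg (by rw [hget]; tauto)]
      rw [hdrop, List.takeWhile_cons, if_neg hb]
      simp
  
lemma pvEndLoop_eq (lines : List String) :
    ∀ n (e : Int), -1 ≤ e → e < lines.length → (e + 1).toNat = n →
      pvEndLoop lines e =
        e - (((lines.take (e + 1).toNat).reverse.takeWhile pvBlank).length : Int) := by
  intro n
  induction n with
  | zero =>
    intro e h1 h2 h3
    have he : e = -1 := by omega
    subst he
    rw [pvEndLoop, dif_neg (by intro h; omega)]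
    simp
  | succ n ih =>
    intro e h1 h2 h3
    have he : 0 ≤ e := by omega
    have hlt : e.toNat < lines.length := by omega
    have hget : PySem.List.pyGetD lines e "" = lines[e.toNat] := by
      have h := PySem.List.pyGetD_natCast lines e.toNat ""
      rw [Int.toNat_of_nonneg he] at h
      rw [h, List.getD_eq_getElem _ _ hlt]
    have htake : lines.take (e + 1).toNat = lines.take e.toNat ++ [lines[e.toNat]] := by
      rw [show (e + 1).toNat = e.toNat + 1 by omega]
      rw [List.take_succ, List.getElem?_eq_getElem hlt]
      rfl
    rw [pvEndLoop]
    by_cases hb : pvBlank lines[e.toNat]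
    · rw [dif_pos ⟨he, by rw [hget]; exact hb⟩]
      rw [ih (e - 1) (by omega) (by omega) (by omega), htake,
        show (e - 1 + 1).toNat = e.toNat by omega, List.reverse_append]
      simp only [List.reverse_cons, List.reverse_nil, List.nil_append, List.singleton_append,
        List.takeWhile_cons, if_pos hb, List.length_cons]
      push_cast
      omega
    · rw [dif_neg (by rw [hget]; tauto), htake, List.reverse_append]
      simp only [List.reverse_cons, List.reverse_nil, List.nil_append, List.singleton_append,
        List.takeWhile_cons, if_neg hb, List.length_nil]
      simp

lemma pvLineIndent_zero (l : String) : pvLineIndent l = 0 := by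
  unfold pvLineIndent
  cases hl : l.toList with
  | nil => simp
  | cons c cs =>
    by_cases hc : c == ' '
    · have hct : ¬ (c == '\t') := by
        simp at hc ⊢; subst hc; decide
      simp [List.dropWhile_cons, hct]
    · simp [List.dropWhile_cons, hc]

lemma pvMinIndent_none_or_zero (cleaned : List String) :
    pvMinIndent cleaned = none ∨ pvMinIndent cleaned = some 0 := by
  unfold pvMinIndent
  suffices h : ∀ acc : Option Nat, acc = none ∨ acc = some 0 →
      (cleaned.foldl
        (fun mi l =>
          if pvBlank l then mi
          else
            match mi with
            | none => some (pvLineIndent l)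
            | some m => some (min m (pvLineIndent l)))
        acc = none ∨
       cleaned.foldl
        (fun mi l =>
          if pvBlank l then mi
          else
            match mi with
            | none => some (pvLineIndent l)
            | some m => some (min m (pvLineIndent l)))
        acc = some 0) by
    exact h none (Or.inl rfl)
  induction cleaned with
  | nil => intro acc hacc; simpa using hacc
  | cons l ls ih =>
    intro acc hacc
    simp only [List.foldl_cons]
    apply ih
    by_cases hb : pvBlank l
    · simpa [hb] using hacc
    · rcases hacc with h | h <;> subst h <;> simp [hb, pvLineIndent_zero]

lemma all_takeWhile_lengths (lines : List String) (h : lines.all pvBlank = true) :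
    (lines.takeWhile pvBlank).length = lines.length ∧
    (lines.reverse.takeWhile pvBlank).length = lines.length := by
  constructor
  · rw [List.takeWhile_eq_self_iff.mpr (by simpa [List.all_eq_true] using h)]
  · rw [List.takeWhile_eq_self_iff.mpr (by
      intro x hx
      exact (List.all_eq_true.mp h) x (List.mem_reverse.mp hx))]
    simp

-- ===== VERDICT (by name: the statement is the Claim_ definition above) =====
theorem clean_and_format_code_spec : Claim_equal_clean_and_format_code := by
  unfold Claim_equal_clean_and_format_code
  intro code _
  unfold Spec_clean_and_format_code clean_and_format_code clean_and_format_code_alt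
  by_cases hc : code == ""
  · simp [hc]
  · simp only [hc, Bool.false_eq_true, if_false]
    set lines := (PySem.Str.split? code "\n").getD [] with hlines
    by_cases hall : lines.all pvBlank
    · -- all lines blank: both return ""
      obtain ⟨h1, h2⟩ := all_takeWhile_lengths lines hall
      have hstart : pvStartLoop lines 0 = (lines.length : Int) := by
        have := pvStartLoop_eq lines lines.length 0 (by omega)
        simpa [h1] using this
      have hend : pvEndLoop lines ((lines.length : Int) - 1) = -1 := by
        rcases Nat.eq_zero_or_pos lines.length with h0 | h0
        · rw [h0]
          rw [pvEndLoop, dif_neg (by intro h; omega)]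
          norm_num
        · have := pvEndLoop_eq lines lines.length ((lines.length : Int) - 1)
            (by omega) (by omega) (by omega)
          rw [this]
          rw [show (((lines.length : Int) - 1) + 1).toNat = lines.length by omega]
          rw [List.take_length, h2]
          omega
      have hidx : pvNbIdx lines 0 = [] := (pvNbIdx_eq_nil_iff lines 0).mpr hall
      rw [hstart, hend]
      rw [if_pos (by omega)]
      have : ((PySem.List.enumerate lines).filter (fun p => !pvBlank p.2)).map Prod.fst = [] := hidx
      rw [this]
    · -- some non-blank line exists
      have hallf : lines.all pvBlank = false := Bool.eq_false_iff.mpr hall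
      set k : Nat := (lines.takeWhile pvBlank).length with hk
      set r : Nat := (lines.reverse.takeWhile pvBlank).length with hr
      obtain ⟨rest, hrest⟩ := pvNbIdx_head lines 0 hallf
      have hlast := pvNbIdx_last lines 0 hallf
      have hpw := pvNbIdx_pairwise lines 0
      rw [hrest] at hlast hpw
      have hle : (0 + (k : Int)) ≤ (0 : Int) + (lines.length : Int) - 1 - (r : Int) := by
        have := head_le_getLastD_of_pairwise_lt _ rest hpw
        omega
      have hstart : pvStartLoop lines 0 = (k : Int) := by
        have := pvStartLoop_eq lines lines.length 0 (by omega)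
        simpa using this
      have hend : pvEndLoop lines ((lines.length : Int) - 1) = (lines.length : Int) - 1 - (r : Int) := by
        have hlen : 0 < lines.length := by
          by_contra hcon
          have h0 : lines = [] := List.length_eq_zero_iff.mp (by omega)
          rw [h0] at hallf
          simp at hallf
        have := pvEndLoop_eq lines lines.length ((lines.length : Int) - 1)
          (by omega) (by omega) (by omega)
        rw [this]
        rw [show (((lines.length : Int) - 1) + 1).toNat = lines.length by omega]
        rw [List.take_length]
      rw [hstart, hend]
      rw [if_neg (by omega)]
      have hB : ((PySem.List.enumerate lines).filter (fun p => !pvBlank p.2)).map Prod.fst =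
          (0 + (k : Int)) :: rest := hrest
      rw [hB]
      change _ = PySem.Str.join "\n"
        (PySem.List.slice lines (some (0 + (k : Int)))
          (some ((((0 : Int) + (k : Int)) :: rest).getLastD 0 + 1)))
      rw [List.getLastD_cons] at hlast ⊢
      rw [hlast]
      rw [show ((0:Int) + (k:Int)) = (k:Int) from by omega,
        show ((0:Int) + (lines.length:Int) - 1 - (r:Int) + 1) = ((lines.length:Int) - 1 - (r:Int) + 1) from by omega]
      set cleaned := PySem.List.slice lines (some (k : Int)) (some ((lines.length : Int) - 1 - (r : Int) + 1)) with hcleaned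
      have hcl2 : (if cleaned.isEmpty then cleaned
          else
            match pvMinIndent cleaned with
            | none => cleaned
            | some m =>
              if 0 < m then
                match pvUnindentLoop m cleaned with
                | some t => t
                | none => cleaned
              else cleaned) = cleaned := by
        by_cases he : cleaned.isEmpty
        · rw [if_pos he]
        · rw [if_neg he]
          rcases pvMinIndent_none_or_zero cleaned with h | h <;> rw [h]
          simp
      rw [hcl2]
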